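-- pv_equiv track=rewrite | github.com/Clement-Wright/TrackManiaAI | scripts/run_full_sac_with_movement_monitor.py | _parse_env_step
-- ===== SOURCE A (Python) =====
-- def _parse_env_step(line: str) -> int | None:
--     marker = "env_step="
--     start = line.find(marker)
--     if start < 0:
--         return None
--     start += len(marker)
--     end = start
--     while end < len(line) and line[end].isdigit():
--         end += 1
--     if end == start:
--         return None
--     return int(line[start:end])
-- ===== SOURCE B (Python) =====
-- def _parse_env_step(line: str) -> int | None:
--     marker = "env_step="
--     m = len(marker)
--     # KMP failure table for the marker
--     fail = [0] * m
--     k = 0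
--     for i in range(1, m):
--         while k > 0 and marker[i] != marker[k]:
--             k = fail[k - 1]
--         if marker[i] == marker[k]:
--             k += 1
--         fail[i] = k
--     # one pass over the line: automaton match of the marker, then digit collection
--     state = 0
--     digits = []
--     for c in line:
--         if state == m:
--             if c.isdigit():
--                 digits.append(c)
--             else:
--                 break
--         else:
--             while state > 0 and c != marker[state]:
--                 state = fail[state - 1]
--             if c == marker[state]:
--                 state += 1
--     if state < m or not digits:
--         return None
--     return int("".join(digits))
-- ===== Notes on version B (the rewrite author's own statement) =====
-- stated objective: alternative
-- what changed: Replaces str.find plus an index-based digit while-loop with a single pass over the characters: a KMP automaton (failure table built first) locates the marker without backtracking over the line, then the same pass collects the digit run.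
import Mathlib
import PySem

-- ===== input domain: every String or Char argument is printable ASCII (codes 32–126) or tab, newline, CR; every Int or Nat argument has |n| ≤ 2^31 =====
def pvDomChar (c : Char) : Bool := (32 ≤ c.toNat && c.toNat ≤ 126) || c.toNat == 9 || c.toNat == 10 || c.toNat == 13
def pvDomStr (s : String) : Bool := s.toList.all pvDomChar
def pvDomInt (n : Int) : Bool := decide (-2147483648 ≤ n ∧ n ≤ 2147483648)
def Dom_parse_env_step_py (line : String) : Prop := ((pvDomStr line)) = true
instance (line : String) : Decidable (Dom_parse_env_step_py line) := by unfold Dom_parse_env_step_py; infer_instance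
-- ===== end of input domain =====

-- B replaces A's str.find + index-based digit while-loop with a single pass over the
-- characters: a KMP automaton (failure table built first) locates the marker, then the
-- same pass collects the digit run (objective: alternative).

-- ===== PORT A =====
-- A's while loop 'while end < len(line) and line[end].isdigit(): end += 1'
def pvScanEnd (line : List Char) (e : Nat) : Nat :=
  if h : e < line.length then
    if PySem.Chars.isdigit (getElem line e h) then pvScanEnd line (e + 1) else e
  else e
termination_by line.length - e

def parse_env_step_py (line : String) : Option Int :=
  let marker := "env_step="
  let start := PySem.Str.find line marker
  if start < 0 then none
  else
    let start := start + PySem.Str.len marker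
    let e := pvScanEnd line.toList start.toNat
    if (e : Int) = start then none
    else PySem.Int.ofChars? (PySem.List.slice line.toList (some start) (some (e : Int)))

-- ===== PORT B =====
def pvMarker : List Char := "env_step=".toList

-- B's inner 'while k > 0 and c != marker[k]: k = fail[k-1]'; the fuel argument
-- (initially k itself) only makes the recursion structural: each Python iteration
-- strictly decreases k, so k iterations always suffice and the fuel never runs out.
def pvBack (fail : List Nat) (mk : List Char) (c : Char) : Nat → Nat → Nat
  | 0, k => k
  | fuel + 1, k =>
    if 0 < k ∧ ¬ c = mk.getD k ' ' then pvBack fail mk c fuel (fail.getD (k - 1) 0) else k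

-- B's failure-table loop 'for i in range(1, m): …; fail[i] = k'
def pvFail : List Nat :=
  ((PySem.List.pyRange 1 (pvMarker.length : Int) 1).foldl
    (fun (st : List Nat × Nat) i =>
      let ci := pvMarker.getD i.toNat ' '
      let k := pvBack st.1 pvMarker ci st.2 st.2
      let k := if ci = pvMarker.getD k ' ' then k + 1 else k
      (st.1.set i.toNat k, k))
    (List.replicate pvMarker.length 0, 0)).1

-- one automaton step of B's matching branch
def pvStep (s : Nat) (c : Char) : Nat :=
  let k := pvBack pvFail pvMarker c s s
  if c = pvMarker.getD k ' ' then k + 1 else k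

-- B's 'for c in line' loop: match the marker, then collect the digit run
def pvLoop (s : Nat) (digits : List Char) : List Char → Nat × List Char
  | [] => (s, digits)
  | c :: rest =>
    if s = pvMarker.length then
      if PySem.Chars.isdigit c then pvLoop s (digits ++ [c]) rest else (s, digits)
    else pvLoop (pvStep s c) digits rest

-- B's final 'int("".join(digits))' is int() of the collected digit characters
def parse_env_step_py_alt (line : String) : Option Int :=
  let res := pvLoop 0 [] line.toList
  if res.1 < pvMarker.length ∨ res.2 = [] then none
  else PySem.Int.ofChars? res.2

-- ===== PRECONDITION & SPEC =====
def Spec_parse_env_step_py (line : String) (out : Option Int) : Prop := out = parse_env_step_py_alt line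
instance (line : String) (out : Option Int) : Decidable (Spec_parse_env_step_py line out) := by unfold Spec_parse_env_step_py; infer_instance

-- ===== CLAIM (what is proved, stated in full; the proofs are below) =====
def Claim_equal_parse_env_step_py : Prop := ∀ (line : String), Dom_parse_env_step_py line → Spec_parse_env_step_py line (parse_env_step_py line)

-- ===== LEMMAS AND PROOFS =====

lemma pvFail_eq : pvFail = [0, 0, 0, 0, 0, 0, 1, 0, 0] := by decide

lemma pvMarker_len : pvMarker.length = 9 := by decide

lemma pvBack_unfold (f : List Nat) (m : List Char) (c : Char) (fuel k : Nat) :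
    pvBack f m c (fuel + 1) k =
      if 0 < k ∧ ¬ c = m.getD k ' ' then pvBack f m c fuel (f.getD (k - 1) 0) else k := rfl

lemma pvBack_k0 (f : List Nat) (m : List Char) (c : Char) (fuel : Nat) :
    pvBack f m c fuel 0 = 0 := by cases fuel <;> rfl

lemma pvBack_stop (f : List Nat) (m : List Char) (c : Char) (fuel k : Nat)
    (h : c = m.getD k ' ') : pvBack f m c fuel k = k := by
  cases fuel with
  | zero => rfl
  | succ n => rw [pvBack_unfold]; simp [h]

-- closed form of one automaton step (via the computed failure table pvFail_eq)
lemma pvStep_generic (s : Nat) (hmem : s = 1 ∨ s = 2 ∨ s = 3 ∨ s = 4 ∨ s = 5 ∨ s = 6 ∨ s = 8)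
    (c : Char) :
    pvStep s c = if c = pvMarker.getD s ' ' then s + 1 else if c = 'e' then 1 else 0 := by
  by_cases h : c = pvMarker.getD s ' '
  · simp only [pvStep, pvBack_stop _ _ _ _ _ h, if_pos h]
  · have hb : pvBack pvFail pvMarker c s s = 0 := by
      rcases hmem with rfl | rfl | rfl | rfl | rfl | rfl | rfl <;>
        · rw [pvBack_unfold, if_pos ⟨by omega, h⟩, pvFail_eq]
          norm_num
          exact pvBack_k0 _ _ _ _
    simp only [pvStep, hb]
    rw [if_neg h, show pvMarker.getD 0 ' ' = 'e' from by decide]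

lemma pvStep0 (c : Char) : pvStep 0 c = if c = 'e' then 1 else 0 := by
  simp only [pvStep, pvBack_k0]
  rw [show pvMarker.getD 0 ' ' = 'e' from by decide]

lemma pvStep7 (c : Char) :
    pvStep 7 c = if c = 'p' then 8 else if c = 'n' then 2 else if c = 'e' then 1 else 0 := by
  have m7 : pvMarker.getD 7 ' ' = 'p' := by decide
  have m1 : pvMarker.getD 1 ' ' = 'n' := by decide
  have m0 : pvMarker.getD 0 ' ' = 'e' := by decide
  by_cases h : c = 'p'
  · have h' : c = pvMarker.getD 7 ' ' := by rw [m7]; exact h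
    simp only [pvStep, pvBack_stop _ _ _ _ _ h', m7, if_pos h]
  · have h' : ¬ c = pvMarker.getD 7 ' ' := by rw [m7]; exact h
    have step7 : pvBack pvFail pvMarker c 7 7 = pvBack pvFail pvMarker c 6 1 := by
      rw [pvBack_unfold, if_pos ⟨by omega, h'⟩, pvFail_eq]
      norm_num
    rw [if_neg h]
    by_cases hn : c = 'n'
    · have h1 : c = pvMarker.getD 1 ' ' := by rw [m1]; exact hn
      simp only [pvStep, step7, pvBack_stop _ _ _ _ _ h1, if_pos h1]
      rw [if_pos hn]
    · have h1 : ¬ c = pvMarker.getD 1 ' ' := by rw [m1]; exact hn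
      have hb : pvBack pvFail pvMarker c 6 1 = 0 := by
        rw [pvBack_unfold, if_pos ⟨by omega, h1⟩, pvFail_eq]
        norm_num
        exact pvBack_k0 _ _ _ _
      simp only [pvStep, step7, hb, m0]
      rw [if_neg hn]

lemma pvStep_eq (s : Nat) (hs : s ≤ 8) (c : Char) :
    pvStep s c = if c = pvMarker.getD s ' ' then s + 1
      else if s = 7 ∧ c = 'n' then 2 else if c = 'e' then 1 else 0 := by
  have gen : ∀ s', s' = 1 ∨ s' = 2 ∨ s' = 3 ∨ s' = 4 ∨ s' = 5 ∨ s' = 6 ∨ s' = 8 →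
      pvStep s' c = if c = pvMarker.getD s' ' ' then s' + 1
        else if s' = 7 ∧ c = 'n' then 2 else if c = 'e' then 1 else 0 := by
    intro s' hmem
    rw [pvStep_generic s' hmem c]
    rcases hmem with rfl | rfl | rfl | rfl | rfl | rfl | rfl <;> simp
  interval_cases s
  · rw [pvStep0 c, show pvMarker.getD 0 ' ' = 'e' from by decide]
    simp
  · exact gen 1 (by norm_num)
  · exact gen 2 (by norm_num)
  · exact gen 3 (by norm_num)
  · exact gen 4 (by norm_num)
  · exact gen 5 (by norm_num)
  · exact gen 6 (by norm_num)
  · rw [pvStep7 c, show pvMarker.getD 7 ' ' = 'p' from by decide]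
    simp
  · exact gen 8 (by norm_num)

-- the automaton invariant: s is the LONGEST prefix of the marker that is a suffix of
-- the processed part p
def pvInv (p : List Char) (s : Nat) : Prop :=
  s ≤ 8 ∧ pvMarker.take s <:+ p ∧ ∀ t, t ≤ 9 → s < t → ¬ pvMarker.take t <:+ p

-- only 0, s itself and (for s = 7) 1 are borders of the marker's length-s prefix
lemma pvBorders (s j : Nat) (hs : s ≤ 8) (hj : j ≤ s)
    (h : pvMarker.take j <:+ pvMarker.take s) : j = 0 ∨ j = s ∨ (s = 7 ∧ j = 1) := by
  revert h
  interval_cases s <;> interval_cases j <;> decide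

lemma pvSnocSuffix (xs ys : List Char) (a b : Char) :
    xs ++ [a] <:+ ys ++ [b] ↔ a = b ∧ xs <:+ ys := by
  constructor
  · intro h
    have h' := List.reverse_prefix.mpr h
    simp only [List.reverse_append, List.reverse_cons, List.reverse_nil, List.nil_append,
      List.singleton_append] at h'
    rcases List.cons_prefix_cons.mp h' with ⟨rfl, hp⟩
    exact ⟨rfl, List.reverse_prefix.mp hp⟩
  · rintro ⟨rfl, ⟨u, rfl⟩⟩
    exact ⟨u, by simp⟩

lemma pvTakeSucc (t : Nat) (ht : t < 9) :
    pvMarker.take (t + 1) = pvMarker.take t ++ [pvMarker.getD t ' '] := by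
  interval_cases t <;> rfl

-- the automaton transition preserves the invariant (and detects a full match)
lemma pvStep_inv (p : List Char) (c : Char) (s : Nat) (hI : pvInv p s) :
    pvStep s c ≤ 9 ∧ pvMarker.take (pvStep s c) <:+ (p ++ [c]) ∧
      ∀ t, t ≤ 9 → pvStep s c < t → ¬ pvMarker.take t <:+ (p ++ [c]) := by
  obtain ⟨hs, h1, h2⟩ := hI
  have key : ∀ t, t ≤ 9 → 1 ≤ t → pvMarker.take t <:+ p ++ [c] →
      pvMarker.getD (t - 1) ' ' = c ∧ (t - 1 = 0 ∨ t - 1 = s ∨ (s = 7 ∧ t - 1 = 1)) := by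
    intro t h9 h1t hsuf
    have hdec : t = (t - 1) + 1 := by omega
    rw [hdec, pvTakeSucc (t - 1) (by omega)] at hsuf
    obtain ⟨hch, hsfx⟩ := (pvSnocSuffix _ _ _ _).mp hsuf
    refine ⟨hch, ?_⟩
    by_cases hle : t - 1 ≤ s
    · have hcmp : pvMarker.take (t - 1) <:+ pvMarker.take s :=
        List.suffix_of_suffix_length_le hsfx h1 (by
          simp only [List.length_take, pvMarker_len]; omega)
      exact pvBorders s (t - 1) hs hle hcmp
    · exact absurd hsfx (h2 (t - 1) (by omega) (by omega))
  rw [pvStep_eq s hs c]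
  by_cases hc : c = pvMarker.getD s ' '
  · rw [if_pos hc]
    refine ⟨by omega, ?_, ?_⟩
    · rw [pvTakeSucc s (by omega)]
      exact (pvSnocSuffix _ _ _ _).mpr ⟨hc.symm, h1⟩
    · intro t ht hgt hsuf
      obtain ⟨hch, hsfx⟩ := key t ht (by omega) hsuf
      rcases hsfx with h0 | hts | ⟨hs7, ht1⟩ <;> omega
  · rw [if_neg hc]
    by_cases h7 : s = 7 ∧ c = 'n'
    · obtain ⟨rfl, rfl⟩ := h7
      rw [if_pos ⟨rfl, rfl⟩]
      refine ⟨by omega, ?_, ?_⟩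
      · show pvMarker.take 2 <:+ p ++ ['n']
        have : pvMarker.take 2 = ['e'] ++ ['n'] := rfl
        rw [this]
        refine (pvSnocSuffix _ _ _ _).mpr ⟨rfl, ?_⟩
        exact List.IsSuffix.trans (by decide : ['e'] <:+ pvMarker.take 7) h1
      · intro t ht hgt hsuf
        obtain ⟨hch, hsfx⟩ := key t ht (by omega) hsuf
        rcases hsfx with h0 | hts | ⟨_, ht1⟩
        · omega
        · rw [hts] at hch
          exact absurd hch.symm hc
        · omega
    · rw [if_neg h7]
      by_cases he : c = 'e'
      · rw [if_pos he]
        refine ⟨by omega, ?_, ?_⟩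
        · subst he
          show pvMarker.take 1 <:+ p ++ ['e']
          have : pvMarker.take 1 = [] ++ ['e'] := rfl
          rw [this]
          exact (pvSnocSuffix _ _ _ _).mpr ⟨rfl, List.nil_suffix⟩
        · intro t ht hgt hsuf
          obtain ⟨hch, hsfx⟩ := key t ht (by omega) hsuf
          rcases hsfx with h0 | hts | ⟨hs7, ht1⟩
          · omega
          · rw [hts] at hch
            exact absurd hch.symm hc
          · rw [ht1] at hch
            rw [he] at hch
            exact absurd hch (by decide)
      · rw [if_neg he]
        refine ⟨by omega, by simp, ?_⟩
        intro t ht hgt hsuf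
        obtain ⟨hch, hsfx⟩ := key t ht (by omega) hsuf
        rcases hsfx with h0 | hts | ⟨hs7, ht1⟩
        · rw [h0] at hch
          exact he (by rw [← hch]; decide)
        · rw [hts] at hch
          exact absurd hch.symm hc
        · rw [ht1] at hch
          exact h7 ⟨hs7, by rw [← hch]; decide⟩

-- digit phase: once the marker is matched, B collects exactly the leading digit run
def pvTakeDigits : List Char → List Char
  | [] => []
  | c :: rest => if PySem.Chars.isdigit c then c :: pvTakeDigits rest else []

lemma pvLoop_digits (rest d : List Char) :
    pvLoop 9 d rest = (9, d ++ pvTakeDigits rest) := by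
  induction rest generalizing d with
  | nil => simp [pvLoop, pvTakeDigits]
  | cons c r ih =>
    rw [pvLoop, if_pos (by rw [pvMarker_len])]
    by_cases hd : PySem.Chars.isdigit c
    · rw [if_pos hd, ih]
      simp [pvTakeDigits, hd]
    · rw [if_neg hd]
      simp [pvTakeDigits, hd]

-- no occurrence of the marker: the automaton never completes
lemma pvLoop_nofind (L : List Char) (hno : ¬ pvMarker <:+: L) :
    ∀ rem p s d, L = p ++ rem → pvInv p s → ∃ s', s' ≤ 8 ∧ pvLoop s d rem = (s', d) := by
  intro rem
  induction rem with
  | nil => intro p s d _ hI; exact ⟨s, hI.1, rfl⟩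
  | cons c rest ih =>
    intro p s d hL hI
    have hs8 : s ≤ 8 := hI.1
    obtain ⟨h9, hsuf, hmax⟩ := pvStep_inv p c s hI
    rw [pvLoop, if_neg (by rw [pvMarker_len]; omega)]
    by_cases hlt : pvStep s c ≤ 8
    · exact ih (p ++ [c]) (pvStep s c) d (by simp [hL]) ⟨hlt, hsuf, hmax⟩
    · exfalso
      have h9' : pvStep s c = 9 := by omega
      rw [h9', (by decide : pvMarker.take 9 = pvMarker)] at hsuf
      refine hno (hsuf.isInfix.trans (List.IsPrefix.isInfix ⟨rest, ?_⟩))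
      simp [hL]

-- first occurrence of the marker ends at e: the automaton completes exactly there
lemma pvLoop_find (L : List Char) (e : Nat)
    (hocc : pvMarker <:+ L.take e) (hel : e ≤ L.length)
    (hmin : ∀ q, q < e → ¬ pvMarker <:+ L.take q) :
    ∀ rem p s d, L = p ++ rem → p.length < e → pvInv p s →
      pvLoop s d rem = pvLoop 9 d (L.drop e) := by
  intro rem
  induction rem with
  | nil =>
    intro p s d hL hlen _
    exfalso
    rw [hL] at hel
    simp at hel
    omega
  | cons c rest ih =>
    intro p s d hL hlen hI
    obtain ⟨h9, hsuf, hmax⟩ := pvStep_inv p c s hI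
    rw [pvLoop, if_neg (by rw [pvMarker_len]; have := hI.1; omega)]
    have htake : L.take (p.length + 1) = p ++ [c] := by
      rw [hL, List.take_append]
      simp [List.take_of_length_le (by omega : p.length ≤ p.length + 1)]
    by_cases he : p.length + 1 = e
    · -- the marker completes exactly here
      have hocc' : pvMarker <:+ p ++ [c] := by rwa [← htake, he]
      have hs9 : pvStep s c = 9 := by
        by_contra hne9
        exact hmax 9 le_rfl (by omega)
          (by rwa [(by decide : pvMarker.take 9 = pvMarker)])
      have hdrop : L.drop e = rest := by
        rw [hL, ← he, List.drop_append]
        simp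
      rw [hs9, hdrop]
    · -- not yet: the invariant is preserved
      have hlt : pvStep s c ≤ 8 := by
        by_contra hgt
        have h9' : pvStep s c = 9 := by omega
        rw [h9', (by decide : pvMarker.take 9 = pvMarker)] at hsuf
        exact hmin (p.length + 1) (by omega) (by rwa [htake])
      exact ih (p ++ [c]) (pvStep s c) d (by simp [hL]) (by simp; omega) ⟨hlt, hsuf, hmax⟩

-- bridge between "occurrence starting at i" (A's find) and "occurrence ending at e" (B)
lemma pvOccTake (L : List Char) (i : Nat) (h : pvMarker <+: L.drop i) :
    pvMarker <:+ L.take (i + 9) := by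
  obtain ⟨u, hu⟩ := h
  refine ⟨L.take i, ?_⟩
  rw [List.take_add, ← hu]
  have : (pvMarker ++ u).take 9 = pvMarker := by
    rw [List.take_append]
    simp [pvMarker_len]
  rw [this]

lemma pvOccDrop (L : List Char) (q : Nat) (hq : q ≤ L.length)
    (h : pvMarker <:+ L.take q) : 9 ≤ q ∧ pvMarker <+: L.drop (q - 9) := by
  obtain ⟨u, hu⟩ := h
  have hlen : (L.take q).length = q := by simp; omega
  have hul : u.length + 9 = q := by
    have := congrArg List.length hu
    simp [pvMarker_len] at this
    omega
  refine ⟨by omega, ⟨L.drop q, ?_⟩⟩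
  have e1 : L.drop (q - 9) = pvMarker ++ L.drop q := by
    conv_lhs => rw [show L = (u ++ pvMarker) ++ L.drop q from by rw [hu, List.take_append_drop]]
    rw [List.drop_append, List.drop_append]
    have h0 : q - 9 = u.length := by omega
    rw [h0]
    simp [pvMarker_len, show u.length - (u.length + 9) = 0 from by omega]
  exact e1.symm

-- A's digit scan equals the take-while digit run
lemma pvScanEnd_eq (L : List Char) (s : Nat) :
    pvScanEnd L s = s + (pvTakeDigits (L.drop s)).length := by
  by_cases h : s < L.length
  · have hd : L.drop s = getElem L s h :: L.drop (s + 1) := List.drop_eq_getElem_cons h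
    rw [pvScanEnd, dif_pos h]
    by_cases hdig : PySem.Chars.isdigit (getElem L s h)
    · rw [if_pos hdig, pvScanEnd_eq L (s + 1), hd]
      simp [pvTakeDigits, hdig]
      omega
    · rw [if_neg hdig, hd]
      simp [pvTakeDigits, hdig]
  · rw [pvScanEnd, dif_neg h, List.drop_eq_nil_of_le (by omega)]
    simp [pvTakeDigits]
termination_by L.length - s

lemma pvTakeDigits_prefix (xs : List Char) : pvTakeDigits xs <+: xs := by
  induction xs with
  | nil => simp [pvTakeDigits]
  | cons c rest ih =>
    simp only [pvTakeDigits]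
    split
    · exact List.cons_prefix_cons.mpr ⟨rfl, ih⟩
    · exact List.nil_prefix

-- ===== VERDICT (by name: the statement is the Claim_ definition above) =====
theorem parse_env_step_py_spec : Claim_equal_parse_env_step_py := by
  intro line _
  unfold Spec_parse_env_step_py parse_env_step_py parse_env_step_py_alt
  simp only [PySem.Str.find_eq]
  generalize line.toList = L
  have hInv0 : pvInv [] 0 := by
    refine ⟨by omega, ⟨[], by simp⟩, ?_⟩
    intro t ht h0 hsuf
    have := hsuf.length_le
    simp [List.length_take, pvMarker_len] at this
    omega
  by_cases hneg : PySem.Chars.find L "env_step=".toList < 0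
  · -- no marker: both none
    have hminus : PySem.Chars.find L "env_step=".toList = -1 := by
      have := PySem.Chars.neg_one_le_find L "env_step=".toList; omega
    have hnin : ¬ pvMarker <:+: L :=
      (PySem.Chars.find_eq_neg_one_iff L "env_step=".toList).mp hminus
    obtain ⟨s', hs', hrun⟩ := pvLoop_nofind L hnin L [] 0 [] (by simp) hInv0
    rw [if_pos hneg, hrun]
    rw [if_pos (by left; rw [pvMarker_len]; omega)]
  · -- marker first occurs at position j
    have hnn : 0 ≤ PySem.Chars.find L "env_step=".toList := by omega
    obtain ⟨hpre, hmin⟩ := PySem.Chars.find_spec hnn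
    set j := (PySem.Chars.find L "env_step=".toList).toNat with hj
    have hfind : PySem.Chars.find L "env_step=".toList = (j : Int) := by omega
    have hel : j + 9 ≤ L.length := by
      have hlen := hpre.length_le
      rw [show ("env_step=".toList).length = 9 from by decide] at hlen
      simp at hlen
      omega
    have hocc : pvMarker <:+ L.take (j + 9) := pvOccTake L j hpre
    have hminq : ∀ q, q < j + 9 → ¬ pvMarker <:+ L.take q := by
      intro q hqe hsuf
      obtain ⟨h9, hp⟩ := pvOccDrop L q (by omega) hsuf
      exact hmin (q - 9) (by omega) hp
    have hrun := pvLoop_find L (j + 9) hocc hel hminq L [] 0 [] (by simp) (by simp) hInv0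
    rw [pvLoop_digits] at hrun
    rw [if_neg hneg, hfind, hrun]
    set rest := L.drop (j + 9) with hrest
    have hlenM : PySem.Str.len "env_step=" = (9 : Int) := by decide
    rw [hlenM]
    have hstart : ((j : Int) + 9) = ((j + 9 : Nat) : Int) := by push_cast; ring
    rw [hstart]
    have htoNat : ((j + 9 : Nat) : Int).toNat = j + 9 := by omega
    rw [htoNat, pvScanEnd_eq]
    simp only [List.nil_append, pvMarker_len, ← hrest]
    by_cases hemp : pvTakeDigits rest = []
    · rw [hemp]
      simp
    · have hlenpos : 0 < (pvTakeDigits rest).length := List.length_pos_iff.mpr hemp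
      rw [if_neg (by push_cast; omega)]
      rw [if_neg (by simp [hemp])]
      congr 1
      rw [PySem.List.slice_natCast L (j + 9) (j + 9 + (pvTakeDigits rest).length)]
      have hc : j + 9 + (pvTakeDigits rest).length - (j + 9) = (pvTakeDigits rest).length := by omega
      rw [hc, hrest]
      exact (List.prefix_iff_eq_take.mp (pvTakeDigits_prefix rest)).symm
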